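-- pv_equiv track=rewrite | github.com/vertuxty/crypto_easy | utilsdiff/solveTasks.py | finds_elements
-- ===== SOURCE A (Python) =====
-- def finds_elements(gauss, privot_marks, fr, pos):
--     ans = [pos]
--     for k in range(len(gauss)):
--         for i in range(len(fr)):
--             if fr[i] == 1 and gauss[k][i] == 1 and privot_marks[k]:
--                 ans.append(k)
--                 break
--     return ans
-- ===== SOURCE B (Python) =====
-- def finds_elements(gauss, privot_marks, fr, pos):
--     hits = set()
--     for i, v in enumerate(fr):
--         if v != 1:
--             continue
--         for k, (row, mark) in enumerate(zip(gauss, privot_marks)):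
--             if k not in hits and mark and row[i] == 1:
--                 hits.add(k)
--     return [pos] + sorted(hits)
-- ===== Notes on version B (the rewrite author's own statement) =====
-- stated objective: alternative
-- what changed: Column-major traversal instead of row-major: for each free column, collect the marked rows with a 1 in that column into a set, then emit [pos] + sorted(set) — the ordered append-with-break loop is replaced by set accumulation in a different traversal order plus a final sort, correct because each qualifying row enters the set exactly once and sorting restores A's increasing-k order.
import Mathlib
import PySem

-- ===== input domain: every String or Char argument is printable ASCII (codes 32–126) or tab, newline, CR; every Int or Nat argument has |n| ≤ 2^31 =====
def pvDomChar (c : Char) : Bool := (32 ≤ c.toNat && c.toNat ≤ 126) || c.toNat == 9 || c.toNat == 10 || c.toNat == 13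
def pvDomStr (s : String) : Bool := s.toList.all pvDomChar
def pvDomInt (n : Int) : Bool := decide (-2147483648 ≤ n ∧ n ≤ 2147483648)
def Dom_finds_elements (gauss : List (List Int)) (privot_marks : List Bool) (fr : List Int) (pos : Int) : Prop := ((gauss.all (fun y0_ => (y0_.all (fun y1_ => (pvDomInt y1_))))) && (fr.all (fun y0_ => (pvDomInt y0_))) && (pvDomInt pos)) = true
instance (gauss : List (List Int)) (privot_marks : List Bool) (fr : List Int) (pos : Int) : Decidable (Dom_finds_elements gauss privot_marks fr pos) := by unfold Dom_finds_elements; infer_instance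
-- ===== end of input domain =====

-- B traverses column-major instead of row-major: for each free column it collects the marked
-- rows with a 1 there into a set, then returns [pos] + sorted(set) — a different traversal
-- order whose result is restored to A's increasing-row order by the final sort.

-- ===== PORT A =====
def finds_elements (gauss : List (List Int)) (privot_marks : List Bool) (fr : List Int) (pos : Int) : List Int :=
  (PySem.List.pyRange 0 (gauss.length : Int) 1).foldl
    (fun ans k =>
      if (PySem.List.pyRange 0 (fr.length : Int) 1).any (fun i =>
            PySem.List.pyGetD fr i 0 == 1 &&
            PySem.List.pyGetD (PySem.List.pyGetD gauss k []) i 0 == 1 &&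
            PySem.List.pyGetD privot_marks k false)
      then ans ++ [k] else ans)
    [pos]

-- ===== PORT B =====
def finds_elements_alt (gauss : List (List Int)) (privot_marks : List Bool) (fr : List Int) (pos : Int) : List Int :=
  pos :: PySem.List.sorted
    ((PySem.List.enumerate fr 0).foldl
      (fun hits p =>
        if p.2 == 1 then
          (PySem.List.enumerate (gauss.zip privot_marks) 0).foldl
            (fun hits kp =>
              if !(PySem.Set.contains hits kp.1) && kp.2.2 &&
                   (PySem.List.pyGetD kp.2.1 p.1 0 == 1)
              then PySem.Set.add hits kp.1 else hits)
            hits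
        else hits)
      PySem.Set.empty)
    (fun x => x) false

-- ===== PRECONDITION & SPEC =====
-- Pre_ excludes exactly the inputs where Python A raises IndexError. pvPreRow states, for one
-- row with its mark (none = privot_marks has no entry for this row), that every free column
-- index A's inner scan actually reaches (the break stops it at the first hit when the mark is
-- true; a missing mark is consulted, and raises, at the first hit) lies inside the row.
def pvPreRow (row : List Int) (mk : Option Bool) (fr : List Int) : Bool :=
  match mk with
  | some true => (List.range fr.length).all (fun i => !(fr.getD i 0 == 1) || decide (i < row.length) ||
                   (List.range i).any (fun j => fr.getD j 0 == 1 && row[j]? == some 1))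
  | some false => (List.range fr.length).all (fun i => !(fr.getD i 0 == 1) || decide (i < row.length))
  | none => (List.range fr.length).all (fun i => !(fr.getD i 0 == 1) ||
              (decide (i < row.length) && !(row.getD i 0 == 1)))

def Pre_finds_elements (gauss : List (List Int)) (privot_marks : List Bool) (fr : List Int) (pos : Int) : Prop :=
  ∀ k, k < gauss.length → pvPreRow (gauss.getD k []) privot_marks[k]? fr = true
instance (gauss : List (List Int)) (privot_marks : List Bool) (fr : List Int) (pos : Int) : Decidable (Pre_finds_elements gauss privot_marks fr pos) := by unfold Pre_finds_elements; infer_instance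

def pvWitness_finds_elements : List (List Int) × List Bool × List Int × Int := ([[1, 0], [0, 1]], [true, false], [1, 0], 5)

def Spec_finds_elements (gauss : List (List Int)) (privot_marks : List Bool) (fr : List Int) (pos : Int) (out : List Int) : Prop := out = finds_elements_alt gauss privot_marks fr pos
instance (gauss : List (List Int)) (privot_marks : List Bool) (fr : List Int) (pos : Int) (out : List Int) : Decidable (Spec_finds_elements gauss privot_marks fr pos out) := by unfold Spec_finds_elements; infer_instance

-- ===== CLAIM (what is proved, stated in full; the proofs are below) =====
def Claim_equal_finds_elements : Prop := ∀ (gauss : List (List Int)) (privot_marks : List Bool) (fr : List Int) (pos : Int), Dom_finds_elements gauss privot_marks fr pos → Pre_finds_elements gauss privot_marks fr pos → Spec_finds_elements gauss privot_marks fr pos (finds_elements gauss privot_marks fr pos)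

-- ===== LEMMAS AND PROOFS =====

theorem any_and_const {α : Type} (l : List α) (f : α → Bool) (c : Bool) :
    l.any (fun x => f x && c) = (l.any f && c) := by
  cases c <;> simp

-- The per-row condition of A's inner scan, expressed over the free-index list.
theorem row_cond_eq (fr row : List Int) (mk : Bool) :
    (PySem.List.pyRange 0 (fr.length : Int) 1).any (fun i =>
        PySem.List.pyGetD fr i 0 == 1 && PySem.List.pyGetD row i 0 == 1 && mk)
    = (mk && (((PySem.List.enumerate fr 0).filter (fun p => p.2 == 1)).map (fun p => p.1)).any
          (fun i => PySem.List.pyGetD row i 0 == 1)) := by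
  rw [any_and_const (f := fun i => PySem.List.pyGetD fr i 0 == 1 && PySem.List.pyGetD row i 0 == 1),
      Bool.and_comm]
  congr 1
  rw [PySem.List.enumerate_eq_map_pyRange (d := 0), List.any_map, List.any_filter, List.any_map]
  simp [Function.comp_def]

-- A computes [pos] followed by the first components of the qualifying (row, mark) pairs,
-- in increasing row order.
theorem portA_eq (gauss : List (List Int)) (privot_marks : List Bool) (fr : List Int) (pos : Int) :
    finds_elements gauss privot_marks fr pos
    = [pos] ++ ((PySem.List.enumerate (gauss.zip privot_marks) 0).filter
        (fun kp => kp.2.2 && (((PySem.List.enumerate fr 0).filter (fun p => p.2 == 1)).map (fun p => p.1)).any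
            (fun i => PySem.List.pyGetD kp.2.1 i 0 == 1))).map (fun kp => kp.1) := by
  unfold finds_elements
  rw [PySem.List.foldl_append_if_eq_filter]
  congr 1
  rw [PySem.List.enumerate_eq_map_pyRange (d := ([], false)), List.filter_map, List.map_map]
  simp only [Function.comp_def, List.map_id']
  rw [PySem.List.len_eq]
  have hm : ((gauss.zip privot_marks).length : Int) ≤ (gauss.length : Int) := by
    simp only [List.length_zip]
    exact_mod_cast Nat.min_le_left _ _
  rw [PySem.List.pyRange_one_append 0 _ _ (by positivity) hm, List.filter_append]
  have h2 : List.filter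
      (fun k =>
        (PySem.List.pyRange 0 (fr.length : Int) 1).any fun i =>
          PySem.List.pyGetD fr i 0 == 1 && PySem.List.pyGetD (PySem.List.pyGetD gauss k []) i 0 == 1 &&
            PySem.List.pyGetD privot_marks k false)
      (PySem.List.pyRange ((gauss.zip privot_marks).length : Int) (gauss.length : Int) 1) = [] := by
    rw [List.filter_eq_nil_iff]
    intro k hk
    rw [PySem.List.mem_pyRange_one] at hk
    have h0 : (0 : Int) ≤ k := le_trans (by positivity) hk.1
    lift k to ℕ using h0
    have hlen : privot_marks.length ≤ k := by
      have := hk.1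
      simp only [List.length_zip] at this
      have h2 := hk.2
      omega
    simp only [PySem.List.pyGetD_natCast, List.getD_eq_default _ _ hlen]
    simp
  rw [h2, List.append_nil]
  apply List.filter_congr
  intro k hk
  rw [PySem.List.mem_pyRange_one] at hk
  have h0 : (0 : Int) ≤ k := le_trans (by positivity) hk.1
  lift k to ℕ using h0
  have hkn : k < (gauss.zip privot_marks).length := by exact_mod_cast hk.2
  have hkg : k < gauss.length := by simp only [List.length_zip] at hkn; omega
  have hkp : k < privot_marks.length := by simp only [List.length_zip] at hkn; omega
  simp only [PySem.List.pyGetD_natCast, List.getD_eq_getElem _ _ hkn,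
      List.getD_eq_getElem _ _ hkg, List.getD_eq_getElem _ _ hkp, List.getElem_zip]
  exact row_cond_eq fr gauss[k] privot_marks[k]

-- Nodup is preserved through B's guarded-add row pass.
theorem nodup_inner (l : List (Int × List Int × Bool)) (i : Int) (s : PySem.Set Int)
    (h : s.Nodup) :
    (l.foldl (fun hits kp => if !(PySem.Set.contains hits kp.1) && kp.2.2 &&
        (PySem.List.pyGetD kp.2.1 i 0 == 1)
      then PySem.Set.add hits kp.1 else hits) s).Nodup := by
  induction l generalizing s with
  | nil => exact h
  | cons x l ih =>
    simp only [List.foldl_cons]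
    split
    · exact ih _ (PySem.Set.nodup_add _ _ h)
    · exact ih _ h

-- Membership after B's guarded-add row pass: the guard 'k not in hits' never loses a member.
theorem mem_inner (l : List (Int × List Int × Bool)) (i : Int) (s : PySem.Set Int) (k : Int) :
    (k ∈ l.foldl (fun hits kp => if !(PySem.Set.contains hits kp.1) && kp.2.2 &&
        (PySem.List.pyGetD kp.2.1 i 0 == 1)
      then PySem.Set.add hits kp.1 else hits) s)
    ↔ k ∈ s ∨ ∃ kp ∈ l, kp.1 = k ∧ kp.2.2 = true ∧ PySem.List.pyGetD kp.2.1 i 0 = 1 := by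
  induction l generalizing s with
  | nil => simp
  | cons x l ih =>
    simp only [List.foldl_cons, ih, List.mem_cons]
    by_cases h1 : (!(PySem.Set.contains s x.1) && x.2.2 && (PySem.List.pyGetD x.2.1 i 0 == 1)) = true
    · rw [if_pos h1]
      simp only [Bool.and_eq_true, Bool.not_eq_eq_eq_not, Bool.not_true, beq_iff_eq] at h1
      simp only [PySem.Set.mem_add]
      constructor
      · rintro ((hk | rfl) | ⟨y, hy, hk, hm', hg'⟩)
        · exact Or.inl hk
        · exact Or.inr ⟨x, Or.inl rfl, rfl, h1.1.2, h1.2⟩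
        · exact Or.inr ⟨y, Or.inr hy, hk, hm', hg'⟩
      · rintro (hk | ⟨y, (rfl | hy), hk, hm', hg'⟩)
        · exact Or.inl (Or.inl hk)
        · exact Or.inl (Or.inr hk.symm)
        · exact Or.inr ⟨y, hy, hk, hm', hg'⟩
    · rw [if_neg h1]
      constructor
      · rintro (hk | ⟨y, hy, hk, hm', hg'⟩)
        · exact Or.inl hk
        · exact Or.inr ⟨y, Or.inr hy, hk, hm', hg'⟩
      · rintro (hk | ⟨y, (rfl | hy), hk, hm', hg'⟩)
        · exact Or.inl hk
        · -- the condition was false yet mark and entry hold: y.1 must already be in s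
          by_cases hmem : y.1 ∈ s
          · exact Or.inl (hk ▸ hmem)
          · exact absurd (by simp [hm', hg', hmem]) h1
        · exact Or.inr ⟨y, hy, hk, hm', hg'⟩

-- Membership of B's full set of hits (column loop around the row pass).
theorem mem_hits (rows : List (Int × List Int × Bool)) (cols : List (Int × Int))
    (s : PySem.Set Int) (k : Int) :
    (k ∈ cols.foldl (fun hits p => if p.2 == 1 then
        rows.foldl (fun hits kp => if !(PySem.Set.contains hits kp.1) && kp.2.2 &&
            (PySem.List.pyGetD kp.2.1 p.1 0 == 1)
          then PySem.Set.add hits kp.1 else hits) hits else hits) s)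
    ↔ k ∈ s ∨ ∃ p ∈ cols, p.2 = 1 ∧ ∃ kp ∈ rows, kp.1 = k ∧ kp.2.2 = true ∧
        PySem.List.pyGetD kp.2.1 p.1 0 = 1 := by
  induction cols generalizing s with
  | nil => simp
  | cons p cols ih =>
    simp only [List.foldl_cons, ih, List.mem_cons]
    by_cases hp : p.2 = 1
    · rw [if_pos (by simp [hp]), mem_inner rows p.1]
      constructor
      · rintro ((hk | hx) | ⟨q, hq, h1, hrest⟩)
        · exact Or.inl hk
        · exact Or.inr ⟨p, Or.inl rfl, hp, hx⟩
        · exact Or.inr ⟨q, Or.inr hq, h1, hrest⟩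
      · rintro (hk | ⟨q, (rfl | hq), h1, hrest⟩)
        · exact Or.inl (Or.inl hk)
        · exact Or.inl (Or.inr hrest)
        · exact Or.inr ⟨q, hq, h1, hrest⟩
    · rw [if_neg (by simp [hp])]
      constructor
      · rintro (hk | ⟨q, hq, h1, hrest⟩)
        · exact Or.inl hk
        · exact Or.inr ⟨q, Or.inr hq, h1, hrest⟩
      · rintro (hk | ⟨q, (rfl | hq), h1, hrest⟩)
        · exact Or.inl hk
        · exact absurd h1 hp
        · exact Or.inr ⟨q, hq, h1, hrest⟩

theorem nodup_hits (rows : List (Int × List Int × Bool)) (cols : List (Int × Int))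
    (s : PySem.Set Int) (h : s.Nodup) :
    (cols.foldl (fun hits p => if p.2 == 1 then
        rows.foldl (fun hits kp => if !(PySem.Set.contains hits kp.1) && kp.2.2 &&
            (PySem.List.pyGetD kp.2.1 p.1 0 == 1)
          then PySem.Set.add hits kp.1 else hits) hits else hits) s).Nodup := by
  induction cols generalizing s with
  | nil => exact h
  | cons p cols ih =>
    simp only [List.foldl_cons]
    split
    · exact ih _ (nodup_inner rows p.1 s h)
    · exact ih _ h

-- A's qualifying-row list is strictly increasing (row indices come from enumerate).
theorem L_pairwise (gauss : List (List Int)) (privot_marks : List Bool) (fr : List Int) :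
    (((PySem.List.enumerate (gauss.zip privot_marks) 0).filter
        (fun kp => kp.2.2 && (((PySem.List.enumerate fr 0).filter (fun p => p.2 == 1)).map (fun p => p.1)).any
            (fun i => PySem.List.pyGetD kp.2.1 i 0 == 1))).map (fun kp => kp.1)).Pairwise (· < ·) := by
  rw [List.pairwise_map]
  have h1 : (PySem.List.enumerate (gauss.zip privot_marks) 0).Pairwise (fun a b => a.1 < b.1) := by
    have := PySem.List.pairwise_lt_pyRange_one (a := 0)
      (b := (0 : Int) + ((gauss.zip privot_marks).length : Int))
    rw [← PySem.List.map_fst_enumerate (gauss.zip privot_marks) 0, List.pairwise_map] at this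
    exact this
  exact h1.sublist (List.filter_sublist)

-- The ports agree: B's sorted set of hits IS A's increasing qualifying-row list.
theorem ports_eq (gauss : List (List Int)) (privot_marks : List Bool) (fr : List Int) (pos : Int) :
    finds_elements gauss privot_marks fr pos = finds_elements_alt gauss privot_marks fr pos := by
  rw [portA_eq]
  unfold finds_elements_alt
  rw [List.singleton_append]
  congr 1
  symm
  apply PySem.List.sorted_eq_of_perm_of_pairwise_lt
  · -- permutation: both Nodup with the same members
    rw [List.perm_ext_iff_of_nodup]
    · intro k
      rw [mem_hits]
      simp only [PySem.Set.empty, List.not_mem_nil, false_or, List.mem_map, List.mem_filter,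
        Bool.and_eq_true, List.any_eq_true, beq_iff_eq]
      constructor
      · rintro ⟨kp, ⟨hkp, hm, i, ⟨p, ⟨hp, h1⟩, rfl⟩, hg⟩, rfl⟩
        exact ⟨p, hp, h1, kp, hkp, rfl, hm, hg⟩
      · rintro ⟨p, hp, h1, kp, hkp, rfl, hm, hg⟩
        exact ⟨kp, ⟨hkp, hm, p.1, ⟨p, ⟨hp, h1⟩, rfl⟩, hg⟩, rfl⟩
    · exact (L_pairwise gauss privot_marks fr).imp ne_of_lt
    · exact nodup_hits _ _ _ List.nodup_nil
  · exact L_pairwise gauss privot_marks fr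

-- ===== VERDICT (by name: the statement is the Claim_ definition above) =====
theorem finds_elements_spec : Claim_equal_finds_elements := by
  intro gauss privot_marks fr pos _ _
  unfold Spec_finds_elements
  exact ports_eq gauss privot_marks fr pos
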